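-- pv_equiv track=rewrite | github.com/62hoon99/daily-programmers | Python3/프로그래머스/1/42862. 체육복/체육복.py | solution
-- ===== SOURCE A (Python) =====
-- def solution(n, lost, reserve):
--     answer = 0
--
--     s_l = set(lost) - set(reserve)
--     s_r = set(reserve) - set(lost)
--
--     s_l = sorted(list(s_l))
--     s_r = sorted(list(s_r))
--
--     pr = 0
--     for s in s_l:
--         while pr < len(s_r) and s + 1 >= s_r[pr]:
--             if s_r[pr] < s - 1:
--                 pr += 1
--             else:
--                 answer += 1
--                 pr += 1
--                 break
--
--     return n - len(s_l) + answer
-- ===== SOURCE B (Python) =====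
-- def solution(n, lost, reserve):
--     need = set(lost) - set(reserve)
--     avail = set(reserve) - set(lost)
--     answer = 0
--     for s in sorted(need):
--         if s - 1 in avail:
--             avail.discard(s - 1)
--             answer += 1
--         elif s + 1 in avail:
--             avail.discard(s + 1)
--             answer += 1
--     return n - len(need) + answer
-- ===== Notes on version B (the rewrite author's own statement) =====
-- stated objective: idiomatic
-- what changed: Replaced A's sorted-reserve two-pointer sweep (persistent index with an inner while loop) by the standard hash-set greedy: reserve stays an unsorted set and each lost student in increasing order borrows from s-1 then s+1 by direct membership test and removal.
import Mathlib
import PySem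

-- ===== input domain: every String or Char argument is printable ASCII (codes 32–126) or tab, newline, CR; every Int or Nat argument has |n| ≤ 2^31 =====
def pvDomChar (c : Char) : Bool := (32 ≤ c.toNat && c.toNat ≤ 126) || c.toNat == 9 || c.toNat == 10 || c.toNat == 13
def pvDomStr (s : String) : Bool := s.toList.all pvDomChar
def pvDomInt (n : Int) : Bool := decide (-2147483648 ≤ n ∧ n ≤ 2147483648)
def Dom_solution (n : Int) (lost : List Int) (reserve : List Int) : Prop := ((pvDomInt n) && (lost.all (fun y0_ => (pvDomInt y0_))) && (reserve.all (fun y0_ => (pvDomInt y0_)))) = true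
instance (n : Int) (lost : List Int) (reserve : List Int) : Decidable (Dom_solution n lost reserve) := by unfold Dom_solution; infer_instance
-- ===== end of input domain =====

-- B replaces A's sorted-reserve two-pointer sweep by the standard hash-set greedy
-- (borrow from s-1 then s+1 by membership in an unsorted set); same return value, no speed claim.

-- ===== PORT A =====
-- inner 'while pr < len(s_r) and s + 1 >= s_r[pr]: …' of A, literal
def solAWhile (sr : List Int) (s : Int) (pr : Nat) (answer : Int) : Nat × Int :=
  if h : pr < sr.length ∧ s + 1 ≥ sr.getD pr 0 then
    if sr.getD pr 0 < s - 1 then solAWhile sr s (pr + 1) answer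
    else (pr + 1, answer + 1)
  else (pr, answer)
termination_by sr.length - pr
decreasing_by omega

def solution (n : Int) (lost : List Int) (reserve : List Int) : Int :=
  let s_l := PySem.List.sorted (PySem.Set.diff (PySem.Set.ofList lost) (PySem.Set.ofList reserve)) (fun x => x) false
  let s_r := PySem.List.sorted (PySem.Set.diff (PySem.Set.ofList reserve) (PySem.Set.ofList lost)) (fun x => x) false
  let st := s_l.foldl (fun (st : Nat × Int) s => solAWhile s_r s st.1 st.2) (0, 0)
  n - (s_l.length : Int) + st.2

-- ===== PORT B =====
def solution_alt (n : Int) (lost : List Int) (reserve : List Int) : Int :=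
  let need : PySem.Set Int := PySem.Set.diff (PySem.Set.ofList lost) (PySem.Set.ofList reserve)
  let avail : PySem.Set Int := PySem.Set.diff (PySem.Set.ofList reserve) (PySem.Set.ofList lost)
  let st := (PySem.List.sorted need (fun x => x) false).foldl
    (fun (st : PySem.Set Int × Int) s =>
      if PySem.Set.contains st.1 (s - 1) then (PySem.Set.discard st.1 (s - 1), st.2 + 1)
      else if PySem.Set.contains st.1 (s + 1) then (PySem.Set.discard st.1 (s + 1), st.2 + 1)
      else st)
    (avail, 0)
  n - PySem.Set.len need + st.2

-- ===== PRECONDITION & SPEC =====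
def Spec_solution (n : Int) (lost : List Int) (reserve : List Int) (out : Int) : Prop := out = solution_alt n lost reserve
instance (n : Int) (lost : List Int) (reserve : List Int) (out : Int) : Decidable (Spec_solution n lost reserve out) := by unfold Spec_solution; infer_instance

-- ===== CLAIM (what is proved, stated in full; the proofs are below) =====
def Claim_equal_solution : Prop := ∀ (n : Int) (lost : List Int) (reserve : List Int), Dom_solution n lost reserve → Spec_solution n lost reserve (solution n lost reserve)

-- ===== LEMMAS AND PROOFS =====

-- Characterisation of A's inner while loop on a strictly increasing reserve list R not
-- containing s: it matches iff s-1 or s+1 occurs at index ≥ pr, the matched element is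
-- s-1 if present else s+1, and the pointer only skips elements < s-1 (plus the match).
theorem solAWhile_spec (R : List Int) (s : Int) (hR : R.Pairwise (· < ·)) (hs : s ∉ R) :
    ∀ (k pr : Nat) (a : Int), R.length - pr ≤ k → pr ≤ R.length →
    ∃ pr₂, pr₂ ≤ R.length ∧
      solAWhile R s pr a
        = (pr₂, if s - 1 ∈ R.drop pr ∨ s + 1 ∈ R.drop pr then a + 1 else a) ∧
      (∀ x ∈ R.drop pr₂, x ∈ R.drop pr ∧
        ((s - 1 ∈ R.drop pr ∨ s + 1 ∈ R.drop pr) →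
          x ≠ (if s - 1 ∈ R.drop pr then s - 1 else s + 1))) ∧
      (∀ x ∈ R.drop pr, x ∈ R.drop pr₂ ∨ x < s - 1 ∨
        ((s - 1 ∈ R.drop pr ∨ s + 1 ∈ R.drop pr) ∧
          x = (if s - 1 ∈ R.drop pr then s - 1 else s + 1))) := by
  intro k
  induction k with
  | zero =>
    intro pr a hk hpr
    have hpr' : pr = R.length := by omega
    have hdrop : R.drop pr = [] := by rw [hpr']; exact List.drop_length
    refine ⟨pr, hpr, ?_, ?_, ?_⟩
    · rw [solAWhile]
      have : ¬ (pr < R.length ∧ s + 1 ≥ R.getD pr 0) := by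
        rintro ⟨h, -⟩; omega
      rw [dif_neg this, if_neg]
      rw [hdrop]; simp
    · rw [hdrop]; intro x hx; exact absurd hx (List.not_mem_nil)
    · rw [hdrop]; intro x hx; exact absurd hx (List.not_mem_nil)
  | succ k ih =>
    intro pr a hk hpr
    by_cases hlt : pr < R.length
    · have hdrop : R.drop pr = R[pr] :: R.drop (pr + 1) := List.drop_eq_getElem_cons hlt
      set r := R[pr] with hr
      have hget : R.getD pr 0 = r := List.getD_eq_getElem R 0 hlt
      have hrtail : ∀ x ∈ R.drop (pr + 1), r < x := by
        have h := hR.drop (i := pr)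
        rw [hdrop] at h
        exact (List.pairwise_cons.mp h).1
      have hrs : r ≠ s := by
        intro h; exact hs (h ▸ List.getElem_mem hlt)
      by_cases h1 : s + 1 ≥ r
      · by_cases h2 : r < s - 1
        · -- skip: pointer advances past r < s-1
          have hstep : solAWhile R s pr a = solAWhile R s (pr + 1) a := by
            rw [solAWhile, dif_pos ⟨hlt, by rw [hget]; exact h1⟩, if_pos (by rw [hget]; exact h2)]
          obtain ⟨pr₂, h₂, heq, hC2, hC3⟩ := ih (pr + 1) a (by omega) (by omega)
          have hmem1 : (s - 1 ∈ R.drop pr) ↔ (s - 1 ∈ R.drop (pr + 1)) := by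
            rw [hdrop, List.mem_cons]
            constructor
            · rintro (h | h); · omega
              · exact h
            · exact Or.inr
          have hmem2 : (s + 1 ∈ R.drop pr) ↔ (s + 1 ∈ R.drop (pr + 1)) := by
            rw [hdrop, List.mem_cons]
            constructor
            · rintro (h | h); · omega
              · exact h
            · exact Or.inr
          refine ⟨pr₂, h₂, ?_, ?_, ?_⟩
          · rw [hstep, heq]
            simp only [hmem1, hmem2]
          · intro x hx
            obtain ⟨hx1, hx2⟩ := hC2 x hx
            refine ⟨by rw [hdrop]; exact List.mem_cons_of_mem _ hx1, ?_⟩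
            simp only [hmem1, hmem2]
            exact hx2
          · intro x hx
            rw [hdrop, List.mem_cons] at hx
            rcases hx with hx | hx
            · right; left; omega
            · rcases hC3 x hx with h | h | h
              · exact Or.inl h
              · exact Or.inr (Or.inl h)
              · right; right
                simp only [hmem1, hmem2]
                exact h
        · -- match: s-1 ≤ r ≤ s+1 and r ≠ s, so r = s-1 or r = s+1
          have hr2 : r = s - 1 ∨ r = s + 1 := by omega
          have hstep : solAWhile R s pr a = (pr + 1, a + 1) := by
            rw [solAWhile, dif_pos ⟨hlt, by rw [hget]; exact h1⟩, if_neg (by rw [hget]; exact h2)]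
          have hmatched : s - 1 ∈ R.drop pr ∨ s + 1 ∈ R.drop pr := by
            rcases hr2 with h | h
            · left; rw [hdrop, ← h]; exact List.mem_cons_self
            · right; rw [hdrop, ← h]; exact List.mem_cons_self
          have hm : (if s - 1 ∈ R.drop pr then s - 1 else s + 1) = r := by
            rcases hr2 with h | h
            · rw [if_pos (by rw [hdrop, ← h]; exact List.mem_cons_self)]; omega
            · rw [if_neg]
              · omega
              · rw [hdrop, List.mem_cons]
                rintro (hc | hc)
                · omega
                · have := hrtail _ hc; omega
          refine ⟨pr + 1, by omega, ?_, ?_, ?_⟩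
          · rw [hstep, if_pos hmatched]
          · intro x hx
            refine ⟨by rw [hdrop]; exact List.mem_cons_of_mem _ hx, fun _ => ?_⟩
            rw [hm]
            exact (hrtail x hx).ne'
          · intro x hx
            rw [hdrop, List.mem_cons] at hx
            rcases hx with hx | hx
            · right; right; exact ⟨hmatched, by rw [hm]; exact hx⟩
            · exact Or.inl hx
      · -- r > s+1: loop body never runs; nothing in range
        have hge : ∀ x ∈ R.drop pr, r ≤ x := by
          rw [hdrop]
          intro x hx
          rcases List.mem_cons.mp hx with h | h
          · omega
          · exact (hrtail x h).le
        have hnm : ¬ (s - 1 ∈ R.drop pr ∨ s + 1 ∈ R.drop pr) := by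
          rintro (h | h)
          · have := hge _ h; omega
          · have := hge _ h; omega
        have hstep : solAWhile R s pr a = (pr, a) := by
          rw [solAWhile, dif_neg]
          rintro ⟨-, hc⟩
          rw [hget] at hc; omega
        exact ⟨pr, hpr, by rw [hstep, if_neg hnm],
          fun x hx => ⟨hx, fun hmm => absurd hmm hnm⟩, fun x hx => Or.inl hx⟩
    · -- pointer already past the end
      have hdrop : R.drop pr = [] := List.drop_eq_nil_of_le (by omega)
      refine ⟨pr, hpr, ?_, ?_, ?_⟩
      · rw [solAWhile]
        have : ¬ (pr < R.length ∧ s + 1 ≥ R.getD pr 0) := by rintro ⟨h, -⟩; omega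
        rw [dif_neg this, if_neg]
        rw [hdrop]; simp
      · rw [hdrop]; intro x hx; exact absurd hx (List.not_mem_nil)
      · rw [hdrop]; intro x hx; exact absurd hx (List.not_mem_nil)

-- The two greedy loops agree: A's pointer state pr and B's availability set av are
-- related by 'av = R.drop pr up to elements too small to ever be borrowed again'.
theorem fold_eq (R L : List Int) (hR : R.Pairwise (· < ·)) (hL : L.Pairwise (· < ·))
    (hdisj : ∀ s ∈ L, s ∉ R) :
    ∀ (pr : Nat) (av : List Int) (a : Int), pr ≤ R.length →
    (∀ x ∈ R.drop pr, x ∈ av) →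
    (∀ x ∈ av, x ∈ R.drop pr ∨ ∀ s ∈ L, x < s - 1) →
    (L.foldl (fun (st : Nat × Int) s => solAWhile R s st.1 st.2) (pr, a)).2
      = (L.foldl
          (fun (st : PySem.Set Int × Int) s =>
            if PySem.Set.contains st.1 (s - 1) then (PySem.Set.discard st.1 (s - 1), st.2 + 1)
            else if PySem.Set.contains st.1 (s + 1) then (PySem.Set.discard st.1 (s + 1), st.2 + 1)
            else st)
          (av, a)).2 := by
  induction L with
  | nil => intro pr av a _ _ _; rfl
  | cons s L' ih =>
    intro pr av a hpr h2 h3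
    obtain ⟨hsL', hL'⟩ := List.pairwise_cons.mp hL
    have hsR : s ∉ R := hdisj s List.mem_cons_self
    have hdisj' : ∀ t ∈ L', t ∉ R := fun t ht => hdisj t (List.mem_cons_of_mem _ ht)
    obtain ⟨pr₂, hpr₂, heq, hC2, hC3⟩ :=
      solAWhile_spec R s hR hsR R.length pr a (by omega) hpr
    have hm1 : (s - 1 ∈ av) ↔ (s - 1 ∈ R.drop pr) := by
      constructor
      · intro h
        rcases h3 _ h with h | h
        · exact h
        · have := h s List.mem_cons_self; omega
      · exact h2 _
    have hm2 : (s + 1 ∈ av) ↔ (s + 1 ∈ R.drop pr) := by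
      constructor
      · intro h
        rcases h3 _ h with h | h
        · exact h
        · have := h s List.mem_cons_self; omega
      · exact h2 _
    simp only [List.foldl_cons]
    by_cases hc1 : s - 1 ∈ R.drop pr
    · have hb1 : PySem.Set.contains av (s - 1) = true :=
        (PySem.Set.contains_iff av (s - 1)).mpr (hm1.mpr hc1)
      rw [heq, if_pos (Or.inl hc1), hb1]
      simp only [if_true]
      apply ih hL' hdisj' pr₂ _ _ hpr₂
      · intro x hx
        obtain ⟨hx1, hx2⟩ := hC2 x hx
        rw [PySem.Set.mem_discard]
        refine ⟨h2 _ hx1, ?_⟩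
        have := hx2 (Or.inl hc1)
        rw [if_pos hc1] at this
        exact this
      · intro x hx
        rw [PySem.Set.mem_discard] at hx
        obtain ⟨hxav, hxne⟩ := hx
        rcases h3 _ hxav with h | h
        · rcases hC3 x h with h' | h' | h'
          · exact Or.inl h'
          · right; intro t ht
            have := hsL' t ht; omega
          · exfalso
            rw [if_pos hc1] at h'
            exact hxne h'.2
        · right; intro t ht; exact h t (List.mem_cons_of_mem _ ht)
    · by_cases hc2 : s + 1 ∈ R.drop pr
      · have hb1 : PySem.Set.contains av (s - 1) = false := by
          rw [← Bool.not_eq_true, PySem.Set.contains_iff]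
          exact fun h => hc1 (hm1.mp h)
        have hb2 : PySem.Set.contains av (s + 1) = true :=
          (PySem.Set.contains_iff av (s + 1)).mpr (hm2.mpr hc2)
        rw [heq, if_pos (Or.inr hc2), hb1, hb2]
        simp only [if_true, if_false, Bool.false_eq_true]
        apply ih hL' hdisj' pr₂ _ _ hpr₂
        · intro x hx
          obtain ⟨hx1, hx2⟩ := hC2 x hx
          rw [PySem.Set.mem_discard]
          refine ⟨h2 _ hx1, ?_⟩
          have := hx2 (Or.inr hc2)
          rw [if_neg hc1] at this
          exact this
        · intro x hx
          rw [PySem.Set.mem_discard] at hx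
          obtain ⟨hxav, hxne⟩ := hx
          rcases h3 _ hxav with h | h
          · rcases hC3 x h with h' | h' | h'
            · exact Or.inl h'
            · right; intro t ht
              have := hsL' t ht; omega
            · exfalso
              rw [if_neg hc1] at h'
              exact hxne h'.2
          · right; intro t ht; exact h t (List.mem_cons_of_mem _ ht)
      · have hb1 : PySem.Set.contains av (s - 1) = false := by
          rw [← Bool.not_eq_true, PySem.Set.contains_iff]
          exact fun h => hc1 (hm1.mp h)
        have hb2 : PySem.Set.contains av (s + 1) = false := by
          rw [← Bool.not_eq_true, PySem.Set.contains_iff]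
          exact fun h => hc2 (hm2.mp h)
        rw [heq, if_neg (by rintro (h | h); exacts [hc1 h, hc2 h]), hb1, hb2]
        simp only [if_false, Bool.false_eq_true]
        apply ih hL' hdisj' pr₂ _ _ hpr₂
        · intro x hx
          exact h2 _ (hC2 x hx).1
        · intro x hxav
          rcases h3 _ hxav with h | h
          · rcases hC3 x h with h' | h' | h'
            · exact Or.inl h'
            · right; intro t ht
              have := hsL' t ht; omega
            · exact absurd h'.1 (by rintro (h | h); exacts [hc1 h, hc2 h])
          · right; intro t ht; exact h t (List.mem_cons_of_mem _ ht)

theorem pairwise_lt_sorted_of_nodup (xs : List Int) (h : xs.Nodup) :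
    (PySem.List.sorted xs (fun x => x) false).Pairwise (· < ·) := by
  have hle := PySem.List.sorted_pairwise xs (fun x => x)
  have hnd : (PySem.List.sorted xs (fun x => x) false).Nodup :=
    ((PySem.List.sorted_perm xs (fun x => x) false).nodup_iff).mpr h
  exact (hle.and hnd).imp (fun hab => lt_of_le_of_ne hab.1 hab.2)

-- ===== VERDICT (by name: the statement is the Claim_ definition above) =====
theorem solution_spec : Claim_equal_solution := by
  unfold Claim_equal_solution Spec_solution
  intro n lost reserve _
  unfold solution solution_alt
  set need := PySem.Set.diff (PySem.Set.ofList lost) (PySem.Set.ofList reserve) with hneed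
  set avail := PySem.Set.diff (PySem.Set.ofList reserve) (PySem.Set.ofList lost) with havail
  set L := PySem.List.sorted need (fun x => x) false with hLdef
  set R := PySem.List.sorted avail (fun x => x) false with hRdef
  have hR : R.Pairwise (· < ·) :=
    pairwise_lt_sorted_of_nodup _ (PySem.Set.nodup_diff _ _ (PySem.Set.nodup_ofList reserve))
  have hL : L.Pairwise (· < ·) :=
    pairwise_lt_sorted_of_nodup _ (PySem.Set.nodup_diff _ _ (PySem.Set.nodup_ofList lost))
  have hdisj : ∀ s ∈ L, s ∉ R := by
    intro s hsL hsR
    rw [hLdef, PySem.List.mem_sorted, hneed, PySem.Set.mem_diff] at hsL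
    rw [hRdef, PySem.List.mem_sorted, havail, PySem.Set.mem_diff] at hsR
    exact hsR.2 hsL.1
  have hkey := fold_eq R L hR hL hdisj 0 avail 0 (Nat.zero_le _)
    (by
      intro x hx
      rw [List.drop_zero, hRdef, PySem.List.mem_sorted] at hx
      exact hx)
    (by
      intro x hx
      left
      rw [List.drop_zero, hRdef, PySem.List.mem_sorted]
      exact hx)
  simp only []
  rw [hkey]
  have hlen : (L.length : Int) = PySem.Set.len need := by
    rw [hLdef, PySem.List.length_sorted, PySem.Set.len]
  rw [hlen]
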